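-- pv_equiv track=rewrite | github.com/Lightless-Labs/third-thoughts | scripts/015_lag_sequential_analysis.py | build_frequency_matrix
-- ===== SOURCE A (Python) =====
-- EVENT_CODES = ["UR", "UC", "UA", "AR", "AE", "AB", "AT", "AK", "AF"]
--
-- def build_frequency_matrix(sequences, lag):
--     """
--     Build a transitional frequency matrix at a given lag.
--
--     For each pair of events (i, j), count how many times event j
--     occurs exactly `lag` steps after event i.
--     """
--     n = len(EVENT_CODES)
--     code_to_idx = {c: i for i, c in enumerate(EVENT_CODES)}
--     matrix = [[0] * n for _ in range(n)]
--
--     for seq in sequences: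
--         for t in range(len(seq) - lag):
--             i_code = seq[t]
--             j_code = seq[t + lag]
--             if i_code in code_to_idx and j_code in code_to_idx:
--                 i = code_to_idx[i_code]
--                 j = code_to_idx[j_code]
--                 matrix[i][j] += 1
--
--     return matrix
-- ===== SOURCE B (Python) =====
-- EVENT_CODES = ["UR", "UC", "UA", "AR", "AE", "AB", "AT", "AK", "AF"]
--
-- def build_frequency_matrix(sequences, lag):
--     """
--     Build a transitional frequency matrix at a given lag.
--
--     Each cell is computed independently: cell(a, b) scans the data and
--     counts the transitions (a, b) at distance `lag`.  No mutable matrix,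
--     no code->index dictionary and no membership filter are needed: a pair
--     whose codes are outside EVENT_CODES simply matches no cell.
--     """
--     def cell(a, b):
--         total = 0
--         for seq in sequences:
--             for x, y in zip(seq, seq[lag:]):
--                 if x == a and y == b:
--                     total += 1
--         return total
--
--     return [[cell(a, b) for b in EVENT_CODES] for a in EVENT_CODES]
-- ===== Notes on version B (the rewrite author's own statement) =====
-- stated objective: alternative
-- what changed: B computes every matrix cell independently (cell(a,b) scans all sequences counting pairs equal to (a,b)), instead of A's single interleaved pass that mutates a matrix through a code->index dictionary; B needs no dictionary, no membership filter and no mutable matrix, trading one pass for n^2 passes over the data. Pre_ excludes lag < 0 with a nonempty sequences list, where A raises IndexError.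
import Mathlib
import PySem

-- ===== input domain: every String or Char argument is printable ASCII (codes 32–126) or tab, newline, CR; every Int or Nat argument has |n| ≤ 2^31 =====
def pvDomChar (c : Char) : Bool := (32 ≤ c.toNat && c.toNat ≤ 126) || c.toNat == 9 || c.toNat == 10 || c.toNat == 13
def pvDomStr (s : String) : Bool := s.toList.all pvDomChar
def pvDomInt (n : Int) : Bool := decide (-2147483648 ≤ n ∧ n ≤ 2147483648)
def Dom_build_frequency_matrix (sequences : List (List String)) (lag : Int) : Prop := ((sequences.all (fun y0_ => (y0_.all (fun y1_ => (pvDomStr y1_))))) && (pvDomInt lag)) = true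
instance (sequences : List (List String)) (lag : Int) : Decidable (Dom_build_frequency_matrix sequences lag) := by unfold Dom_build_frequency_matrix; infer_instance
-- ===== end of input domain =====

-- B recomputes each matrix cell independently by scanning the sequences (no dictionary, no
-- membership filter, no mutable matrix) — an alternative per-cell algorithm, not faster.

-- EVENT_CODES (module-level constant used by both versions)
def pvCodes : List String := ["UR", "UC", "UA", "AR", "AE", "AB", "AT", "AK", "AF"]

-- ===== PORT A =====
def build_frequency_matrix (sequences : List (List String)) (lag : Int) : List (List Int) :=
  let n : Int := (pvCodes.length : Int)
  let code_to_idx : PySem.Dict String Int :=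
    (PySem.List.enumerate pvCodes 0).foldl (fun d p => d.insert p.2 p.1) PySem.Dict.empty
  let matrix : List (List Int) :=
    (PySem.List.pyRange 0 n 1).map (fun _ => List.replicate n.toNat (0 : Int))
  sequences.foldl (fun matrix seq =>
    (PySem.List.pyRange 0 ((seq.length : Int) - lag) 1).foldl (fun matrix t =>
      -- seq[t] and seq[t + lag]: in range on every input admitted by Pre_ (default never read)
      let i_code := PySem.List.pyGetD seq t ""
      let j_code := PySem.List.pyGetD seq (t + lag) ""
      if code_to_idx.contains i_code && code_to_idx.contains j_code then
        let i := code_to_idx.getD i_code 0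
        let j := code_to_idx.getD j_code 0
        -- matrix[i][j] += 1 ; i, j come from code_to_idx, hence 0 ≤ i, j < n
        matrix.modify i.toNat (fun row => row.modify j.toNat (· + 1))
      else matrix) matrix) matrix

-- ===== PORT B =====
-- cell(a, b): scan all sequences, counting the pairs of zip(seq, seq[lag:]) equal to (a, b)
def bfm_cell (sequences : List (List String)) (lag : Int) (a b : String) : Int :=
  sequences.foldl (fun total seq =>
    (seq.zip (PySem.List.slice seq (some lag) none)).foldl
      (fun total p => if p.1 == a && p.2 == b then total + 1 else total) total) 0

def build_frequency_matrix_alt (sequences : List (List String)) (lag : Int) : List (List Int) :=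
  pvCodes.map (fun a => pvCodes.map (fun b => bfm_cell sequences lag a b))

-- ===== PRECONDITION & SPEC =====
-- Pre_ excludes exactly the inputs where A raises IndexError: lag < 0 with at least one
-- sequence (range(len(seq) - lag) then indexes past the end of seq).
def Pre_build_frequency_matrix (sequences : List (List String)) (lag : Int) : Prop :=
  0 ≤ lag ∨ sequences = []
instance (sequences : List (List String)) (lag : Int) : Decidable (Pre_build_frequency_matrix sequences lag) := by unfold Pre_build_frequency_matrix; infer_instance

def pvWitness_build_frequency_matrix : List (List String) × Int :=
  ([["UR", "UC", "UR"], ["AE"]], 1)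

def Spec_build_frequency_matrix (sequences : List (List String)) (lag : Int) (out : List (List Int)) : Prop := out = build_frequency_matrix_alt sequences lag
instance (sequences : List (List String)) (lag : Int) (out : List (List Int)) : Decidable (Spec_build_frequency_matrix sequences lag out) := by unfold Spec_build_frequency_matrix; infer_instance

-- ===== CLAIM (what is proved, stated in full; the proofs are below) =====
def Claim_equal_build_frequency_matrix : Prop := ∀ (sequences : List (List String)) (lag : Int), Dom_build_frequency_matrix sequences lag → Pre_build_frequency_matrix sequences lag → Spec_build_frequency_matrix sequences lag (build_frequency_matrix sequences lag)

-- ===== LEMMAS AND PROOFS =====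

-- the matrix rendered from a cell function
def pvTable (g : String → String → Int) : List (List Int) :=
  pvCodes.map (fun a => pvCodes.map (fun b => g a b))

-- the valid transition pairs of one sequence
def pvPairs (seq : List String) (lag : Int) : List (String × String) :=
  (seq.zip (PySem.List.slice seq (some lag) none)).filter
    (fun pair => pvCodes.contains pair.1 && pvCodes.contains pair.2)

def pvIdx (a : String) : Nat := pvCodes.idxOf a

def pvStep (m : List (List Int)) (p : String × String) : List (List Int) :=
  m.modify (pvIdx p.1) (fun row => row.modify (pvIdx p.2) (· + 1))

def pvDictA : PySem.Dict String Int :=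
  (PySem.List.enumerate pvCodes 0).foldl (fun d p => d.insert p.2 p.1) PySem.Dict.empty

lemma pvDictA_contains (a : String) : pvDictA.contains a = pvCodes.contains a := by
  rw [PySem.Dict.contains_eq_decide_mem_keys]
  have h : pvDictA.keys = pvCodes := by decide
  rw [h, List.contains_eq_mem]

lemma pvDictA_getD (a : String) (h : a ∈ pvCodes) : pvDictA.getD a 0 = (pvIdx a : Int) := by
  fin_cases h <;> decide

lemma mem_pvPairs (seq : List String) (lag : Int) (p : String × String)
    (hp : p ∈ pvPairs seq lag) : p.1 ∈ pvCodes ∧ p.2 ∈ pvCodes := by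
  rw [pvPairs, List.mem_filter] at hp
  have := hp.2
  simp only [Bool.and_eq_true, List.contains_eq_mem, decide_eq_true_eq] at this
  exact this

lemma modify_map_table {β : Type} (E : List String) (hnd : E.Nodup) (a : String) (ha : a ∈ E)
    (f : String → β) (h : β → β) :
    (E.map f).modify (E.idxOf a) h = E.map (fun x => if x = a then h (f x) else f x) := by
  have hidx : E.idxOf a < E.length := List.idxOf_lt_length_iff.mpr ha
  apply List.ext_getElem
  · simp
  · intro k hk1 hk2
    simp only [List.length_modify, List.length_map] at hk1
    rw [List.getElem_modify]
    simp only [List.getElem_map]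
    by_cases hik : E.idxOf a = k
    · subst hik
      rw [if_pos rfl, if_pos (List.getElem_idxOf hidx)]
    · rw [if_neg hik, if_neg ?_]
      intro he
      apply hik
      have h1 : E[E.idxOf a]'hidx = E[k]'hk1 := by rw [List.getElem_idxOf hidx, he]
      have hinj := List.nodup_iff_injective_getElem.mp hnd
      have := hinj (a₁ := ⟨E.idxOf a, hidx⟩) (a₂ := ⟨k, hk1⟩) h1
      exact congrArg Fin.val this

lemma pvStep_table (p : String × String) (h1 : p.1 ∈ pvCodes) (h2 : p.2 ∈ pvCodes)
    (g : String → String → Int) :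
    pvStep (pvTable g) p =
      pvTable (fun a b => if a = p.1 ∧ b = p.2 then g a b + 1 else g a b) := by
  have hnd : pvCodes.Nodup := by decide
  unfold pvStep pvTable pvIdx
  rw [modify_map_table pvCodes hnd p.1 h1]
  apply List.map_congr_left
  intro x hx
  by_cases hx1 : x = p.1
  · subst hx1
    rw [if_pos rfl, modify_map_table pvCodes hnd p.2 h2]
    apply List.map_congr_left
    intro y _
    by_cases hy2 : y = p.2
    · simp [hy2]
    · simp [hy2]
  · rw [if_neg hx1]
    apply List.map_congr_left
    intro y _
    exact (if_neg (by tauto)).symm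

lemma foldl_pvStep_table (L : List (String × String))
    (hL : ∀ p ∈ L, p.1 ∈ pvCodes ∧ p.2 ∈ pvCodes) (g : String → String → Int) :
    L.foldl pvStep (pvTable g) = pvTable (fun a b => g a b + (L.count (a, b) : Int)) := by
  induction L generalizing g with
  | nil => simp [pvTable]
  | cons p L ih =>
    have hp := hL p (List.mem_cons_self ..)
    rw [List.foldl_cons, pvStep_table p hp.1 hp.2,
        ih (fun q hq => hL q (List.mem_cons_of_mem _ hq))]
    unfold pvTable
    apply List.map_congr_left; intro a _
    apply List.map_congr_left; intro b _
    simp only [List.count_cons, beq_iff_eq, Prod.ext_iff]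
    split_ifs with h1 h2 h2 <;> first | omega | (exfalso; tauto)

lemma mapped_eq (seq : List String) (lag : Int) (hlag : 0 ≤ lag) :
    (PySem.List.pyRange 0 ((seq.length : Int) - lag) 1).map
      (fun t => (PySem.List.pyGetD seq t "", PySem.List.pyGetD seq (t + lag) ""))
    = seq.zip (PySem.List.slice seq (some lag) none) := by
  rw [PySem.List.slice_from seq hlag]
  apply List.ext_getElem
  · simp only [List.length_map, PySem.List.length_pyRange_one, List.length_zip,
      List.length_drop]
    omega
  · intro k hk1 hk2
    simp only [List.length_map, PySem.List.length_pyRange_one] at hk1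
    have hk : (k : Int) < (seq.length : Int) - lag := by omega
    have hklen : k < seq.length := by omega
    rw [List.getElem_map, PySem.List.getElem_pyRange_one _ _ _ (by
      simpa [PySem.List.length_pyRange_one] using hk1)]
    rw [List.getElem_zip, List.getElem_drop]
    have e1 : PySem.List.pyGetD seq ((0 : Int) + (k : Int)) "" = seq[k]'hklen := by
      rw [PySem.List.pyGetD_eq_getElem seq "" (by omega) (by omega)]
      congr 1
      omega
    have e2 : PySem.List.pyGetD seq ((0 : Int) + (k : Int) + lag) "" =
        seq[lag.toNat + k]'(by omega) := by
      rw [PySem.List.pyGetD_eq_getElem seq "" (by omega) (by omega)]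
      congr 1
      omega
    rw [e1, e2]

lemma innerA_eq (seq : List String) (lag : Int) (hlag : 0 ≤ lag) (m : List (List Int)) :
    (PySem.List.pyRange 0 ((seq.length : Int) - lag) 1).foldl
      (fun matrix t =>
        if pvDictA.contains (PySem.List.pyGetD seq t "") &&
            pvDictA.contains (PySem.List.pyGetD seq (t + lag) "") then
          matrix.modify (pvDictA.getD (PySem.List.pyGetD seq t "") 0).toNat
            (fun row => row.modify (pvDictA.getD (PySem.List.pyGetD seq (t + lag) "") 0).toNat
              (· + 1))
        else matrix) m
    = (pvPairs seq lag).foldl pvStep m := by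
  symm
  calc (pvPairs seq lag).foldl pvStep m
      = (pvPairs seq lag).foldl
          (fun acc p => acc.modify (pvDictA.getD p.1 0).toNat
            (fun row => row.modify (pvDictA.getD p.2 0).toNat (· + 1))) m := by
        apply PySem.List.foldl_congr_mem
        intro acc p hp
        obtain ⟨hm1, hm2⟩ := mem_pvPairs seq lag p hp
        rw [pvStep, pvDictA_getD p.1 hm1, pvDictA_getD p.2 hm2]
        simp
    _ = ((seq.zip (PySem.List.slice seq (some lag) none)).filter
          (fun pair => pvDictA.contains pair.1 && pvDictA.contains pair.2)).foldl
          (fun acc p => acc.modify (pvDictA.getD p.1 0).toNat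
            (fun row => row.modify (pvDictA.getD p.2 0).toNat (· + 1))) m := by
        rw [pvPairs, List.filter_congr (fun p _ => by
          rw [← pvDictA_contains p.1, ← pvDictA_contains p.2])]
    _ = (seq.zip (PySem.List.slice seq (some lag) none)).foldl
          (fun matrix p =>
            if pvDictA.contains p.1 && pvDictA.contains p.2 then
              matrix.modify (pvDictA.getD p.1 0).toNat
                (fun row => row.modify (pvDictA.getD p.2 0).toNat (· + 1))
            else matrix) m := List.foldl_filter
    _ = ((PySem.List.pyRange 0 ((seq.length : Int) - lag) 1).map
          (fun t => (PySem.List.pyGetD seq t "", PySem.List.pyGetD seq (t + lag) ""))).foldl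
          (fun matrix p =>
            if pvDictA.contains p.1 && pvDictA.contains p.2 then
              matrix.modify (pvDictA.getD p.1 0).toNat
                (fun row => row.modify (pvDictA.getD p.2 0).toNat (· + 1))
            else matrix) m := by rw [mapped_eq seq lag hlag]
    _ = _ := List.foldl_map

lemma a_fold (sequences : List (List String)) (lag : Int)
    (g : String → String → Int) :
    sequences.foldl (fun matrix seq => (pvPairs seq lag).foldl pvStep matrix) (pvTable g)
    = pvTable (fun a b =>
        g a b + ((sequences.flatMap (fun s => pvPairs s lag)).count (a, b) : Int)) := by
  induction sequences generalizing g with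
  | nil => simp [pvTable]
  | cons s rest ih =>
    rw [List.foldl_cons,
        foldl_pvStep_table _ (fun p hp => mem_pvPairs s lag p hp) g, ih]
    unfold pvTable
    apply List.map_congr_left; intro a _
    apply List.map_congr_left; intro b _
    simp only [List.flatMap_cons, List.count_append]
    push_cast
    ring

-- the inner fold of bfm_cell adds the number of matching pairs to the accumulator
lemma inner_cell_fold (L : List (String × String)) (a b : String) (t : Int) :
    L.foldl (fun total p => if p.1 == a && p.2 == b then total + 1 else total) t
    = t + (L.countP (fun p => p.1 == a && p.2 == b) : Int) := by
  induction L generalizing t with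
  | nil => simp
  | cons p L ih =>
    rw [List.foldl_cons, ih, List.countP_cons]
    split_ifs with h <;> push_cast <;> ring

-- counting (a, b) in the filtered pair list equals B's unfiltered per-cell count
lemma count_pvPairs (seq : List String) (lag : Int) (a b : String)
    (ha : a ∈ pvCodes) (hb : b ∈ pvCodes) :
    (pvPairs seq lag).count (a, b)
    = (seq.zip (PySem.List.slice seq (some lag) none)).countP
        (fun p => p.1 == a && p.2 == b) := by
  rw [pvPairs, List.count_filter (by
    simp only [Bool.and_eq_true, List.contains_eq_mem, decide_eq_true_eq]
    exact ⟨ha, hb⟩)]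
  rw [List.count]
  apply List.countP_congr
  intro p _
  constructor <;> intro h
  · obtain ⟨h1, h2⟩ := Prod.mk.injEq .. ▸ (beq_iff_eq.mp h)
    simp [h1, h2]
  · simp only [Bool.and_eq_true, beq_iff_eq] at h
    exact beq_iff_eq.mpr (Prod.ext h.1 h.2)

lemma cell_eq (sequences : List (List String)) (lag : Int) (a b : String)
    (ha : a ∈ pvCodes) (hb : b ∈ pvCodes) :
    bfm_cell sequences lag a b
    = ((sequences.flatMap (fun s => pvPairs s lag)).count (a, b) : Int) := by
  unfold bfm_cell
  have h1 : sequences.foldl (fun total seq =>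
        (seq.zip (PySem.List.slice seq (some lag) none)).foldl
          (fun total p => if p.1 == a && p.2 == b then total + 1 else total) total) 0
      = sequences.foldl (fun total seq =>
          total + ((seq.zip (PySem.List.slice seq (some lag) none)).countP
            (fun p => p.1 == a && p.2 == b) : Int)) 0 := by
    apply PySem.List.foldl_congr_mem
    intro acc seq _
    exact inner_cell_fold _ a b acc
  have h2 : ∀ (L : List (List String)),
      (L.map (fun seq => ((seq.zip (PySem.List.slice seq (some lag) none)).countP
          (fun p => p.1 == a && p.2 == b) : Int))).sum
      = ((L.flatMap (fun s => pvPairs s lag)).count (a, b) : Int) := by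
    intro L
    induction L with
    | nil => simp
    | cons s rest ih =>
      rw [List.map_cons, List.sum_cons, ih, List.flatMap_cons, List.count_append,
          count_pvPairs s lag a b ha hb]
      push_cast
      ring
  rw [h1, PySem.List.foldl_add, zero_add, h2]

lemma altB_eq (sequences : List (List String)) (lag : Int) :
    build_frequency_matrix_alt sequences lag
    = pvTable (fun a b =>
        ((sequences.flatMap (fun s => pvPairs s lag)).count (a, b) : Int)) := by
  unfold build_frequency_matrix_alt pvTable
  apply List.map_congr_left; intro a ha
  apply List.map_congr_left; intro b hb
  exact cell_eq sequences lag a b ha hb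

-- ===== VERDICT =====
theorem build_frequency_matrix_spec : Claim_equal_build_frequency_matrix := by
  intro sequences lag _ hpre
  unfold Spec_build_frequency_matrix
  rcases hpre with hlag | hnil
  · have hd : (PySem.List.enumerate pvCodes 0).foldl
        (fun d p => d.insert p.2 p.1) PySem.Dict.empty = pvDictA := rfl
    have hinit : (PySem.List.pyRange 0 ((pvCodes.length : Int)) 1).map
        (fun _ => List.replicate ((pvCodes.length : Int)).toNat (0 : Int))
        = pvTable (fun _ _ => 0) := by decide
    have hbody : ∀ (matrix : List (List Int)) (seq : List String),
        (PySem.List.pyRange 0 ((seq.length : Int) - lag) 1).foldl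
          (fun matrix t =>
            if pvDictA.contains (PySem.List.pyGetD seq t "") &&
                pvDictA.contains (PySem.List.pyGetD seq (t + lag) "") then
              matrix.modify (pvDictA.getD (PySem.List.pyGetD seq t "") 0).toNat
                (fun row =>
                  row.modify (pvDictA.getD (PySem.List.pyGetD seq (t + lag) "") 0).toNat
                    (· + 1))
            else matrix) matrix
        = (pvPairs seq lag).foldl pvStep matrix := fun m seq => innerA_eq seq lag hlag m
    rw [altB_eq]
    simp only [build_frequency_matrix, hd, hinit, hbody]
    rw [a_fold sequences lag (fun _ _ => 0)]
    unfold pvTable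
    simp only [zero_add]
  · subst hnil
    rw [altB_eq]
    simp only [build_frequency_matrix, List.foldl_nil, List.flatMap_nil]
    decide
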